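-- pv_equiv track=rewrite | github.com/DLLXW/data-science-competition | tianchi/高德地图/Xception_Lgb_roundB.py | cnt_results
-- ===== SOURCE A (Python) =====
-- def cnt_results(submit):
--     count_result = {'畅通': 0, '缓行': 0, '拥堵': 0}
--     submit_annos = submit['annotations']
--     submit_result = []
--     for i in range(len(submit_annos)):
--         submit_anno = submit_annos[i]
--         status = submit_anno['status']
--         submit_result.append(status)
--         if status == 0:
--             count_result['畅通'] += 1
--         elif status == 1:
--             count_result['缓行'] += 1
--         else:
--             count_result['拥堵'] += 1
--     return count_result['畅通'], count_result['缓行'], count_result['拥堵']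
-- ===== SOURCE B (Python) =====
-- def cnt_results(submit):
--     # Divide-and-conquer tally: split the annotation list in half, tally each
--     # half recursively, and add the resulting (clear, slow, jammed) triples.
--     def tally(annos):
--         n = len(annos)
--         if n == 0:
--             return (0, 0, 0)
--         if n == 1:
--             s = annos[0]['status']
--             return (1, 0, 0) if s == 0 else ((0, 1, 0) if s == 1 else (0, 0, 1))
--         mid = n // 2
--         l0, l1, l2 = tally(annos[:mid])
--         r0, r1, r2 = tally(annos[mid:])
--         return (l0 + r0, l1 + r1, l2 + r2)
--     return tally(submit['annotations'])
-- ===== Notes on version B (the rewrite author's own statement) =====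
-- stated objective: alternative
-- what changed: Replaces A's single left-to-right loop mutating a counter dict (plus a dead submit_result list) with a divide-and-conquer recursion that splits the annotation list in half, tallies each half into a (clear,slow,jammed) triple and adds the triples.
import Mathlib
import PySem

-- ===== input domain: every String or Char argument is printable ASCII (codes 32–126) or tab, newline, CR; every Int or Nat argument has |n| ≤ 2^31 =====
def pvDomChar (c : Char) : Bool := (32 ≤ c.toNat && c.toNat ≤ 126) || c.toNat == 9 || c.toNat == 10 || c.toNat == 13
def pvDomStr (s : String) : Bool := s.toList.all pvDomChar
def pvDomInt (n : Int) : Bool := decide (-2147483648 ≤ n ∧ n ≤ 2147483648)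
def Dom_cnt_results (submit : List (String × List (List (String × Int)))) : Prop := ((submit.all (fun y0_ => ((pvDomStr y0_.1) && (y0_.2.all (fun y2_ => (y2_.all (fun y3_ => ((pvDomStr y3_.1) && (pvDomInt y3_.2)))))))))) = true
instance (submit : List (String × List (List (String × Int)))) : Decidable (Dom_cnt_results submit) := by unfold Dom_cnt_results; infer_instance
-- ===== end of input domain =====

-- B replaces A's single left-to-right loop over a mutable counter dict (and a dead list) by a
-- divide-and-conquer recursion that tallies each half and adds the triples; return values proved equal.

-- status of one annotation dict (submit_anno['status']; Pre_ guarantees the key is present)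
def pvStatus (a : List (String × Int)) : Int :=
  (PySem.Dict.get? (PySem.Dict.mk a) "status").getD 0

-- ===== PORT A =====
-- the body of A's for-loop (state = (submit_result, count_result)), one iteration
def pvStep (st : List Int × PySem.Dict String Int) (submit_anno : List (String × Int)) :
    List Int × PySem.Dict String Int :=
  let status := pvStatus submit_anno
  let submit_result := st.1 ++ [status]
  let d := st.2
  if status == 0 then (submit_result, d.insert "畅通" (d.getD "畅通" 0 + 1))
  else if status == 1 then (submit_result, d.insert "缓行" (d.getD "缓行" 0 + 1))
  else (submit_result, d.insert "拥堵" (d.getD "拥堵" 0 + 1))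

def cnt_results (submit : List (String × List (List (String × Int)))) : Int × Int × Int :=
  match PySem.Dict.get? (PySem.Dict.mk submit) "annotations" with
  | none => (0, 0, 0)   -- KeyError in Python; excluded by Pre_
  | some submit_annos =>
    let count_result : PySem.Dict String Int :=
      PySem.Dict.mk [("畅通", 0), ("缓行", 0), ("拥堵", 0)]
    -- the loop carries submit_result (unused for the return value) and the counter dict
    let fin := submit_annos.foldl pvStep ([], count_result)
    (fin.2.getD "畅通" 0, fin.2.getD "缓行" 0, fin.2.getD "拥堵" 0)

-- ===== PORT B =====
-- divide-and-conquer tally (Source B's inner 'tally'); annos[:mid]/annos[mid:] = take/drop for 0 ≤ mid ≤ n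
def pvTally (annos : List (List (String × Int))) : Int × Int × Int :=
  if annos.length = 0 then (0, 0, 0)
  else if annos.length = 1 then
    let s := pvStatus ((PySem.List.pyGet? annos 0).getD [])   -- annos[0]; in range since n = 1
    if s == 0 then (1, 0, 0) else if s == 1 then (0, 1, 0) else (0, 0, 1)
  else
    let mid := annos.length / 2
    let l := pvTally (annos.take mid)
    let r := pvTally (annos.drop mid)
    (l.1 + r.1, l.2.1 + r.2.1, l.2.2 + r.2.2)
termination_by annos.length
decreasing_by
  · simp [List.length_take]; omega
  · simp [List.length_drop]; omega

def cnt_results_alt (submit : List (String × List (List (String × Int)))) : Int × Int × Int :=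
  match PySem.Dict.get? (PySem.Dict.mk submit) "annotations" with
  | none => (0, 0, 0)   -- KeyError in Python; excluded by Pre_
  | some annos => pvTally annos

-- ===== PRECONDITION & SPEC =====
-- Pre_ excludes exactly the inputs where the Python raises KeyError: a missing 'annotations'
-- key, or an annotation without a 'status' key.
def Pre_cnt_results (submit : List (String × List (List (String × Int)))) : Prop :=
  (PySem.Dict.get? (PySem.Dict.mk submit) "annotations").isSome = true ∧
  ((PySem.Dict.get? (PySem.Dict.mk submit) "annotations").getD []).all
    (fun a => (PySem.Dict.mk a).contains "status") = true
instance (submit : List (String × List (List (String × Int)))) : Decidable (Pre_cnt_results submit) := by unfold Pre_cnt_results; infer_instance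
def pvWitness_cnt_results : (List (String × List (List (String × Int)))) :=
  [("annotations", [[("status", 0)], [("status", 2)], [("status", 1)], [("status", 0)]])]
def Spec_cnt_results (submit : List (String × List (List (String × Int)))) (out : Int × Int × Int) : Prop := out = cnt_results_alt submit
instance (submit : List (String × List (List (String × Int)))) (out : Int × Int × Int) : Decidable (Spec_cnt_results submit out) := by unfold Spec_cnt_results; infer_instance

-- ===== CLAIM (what is proved, stated in full; the proofs are below) =====
def Claim_equal_cnt_results : Prop := ∀ (submit : List (String × List (List (String × Int)))), Dom_cnt_results submit → Pre_cnt_results submit → Spec_cnt_results submit (cnt_results submit)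

-- ===== LEMMAS AND PROOFS =====

-- loop invariant for A's fold: each counter grows by the corresponding tally; the third one
-- equals length minus the first two because the three branches are exclusive and exhaustive.
lemma cnt_loop_invariant (l : List (List (String × Int))) :
    ∀ (sr : List Int) (d : PySem.Dict String Int),
    (l.foldl pvStep (sr, d)).2.getD "畅通" 0
      = d.getD "畅通" 0 + (l.countP (fun a => pvStatus a == 0) : Int) ∧
    (l.foldl pvStep (sr, d)).2.getD "缓行" 0
      = d.getD "缓行" 0 + (l.countP (fun a => pvStatus a == 1) : Int) ∧
    (l.foldl pvStep (sr, d)).2.getD "拥堵" 0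
      = d.getD "拥堵" 0 +
        ((l.length : Int) - (l.countP (fun a => pvStatus a == 0) : Int)
                          - (l.countP (fun a => pvStatus a == 1) : Int)) := by
  induction l with
  | nil => intro sr d; simp
  | cons a t ih =>
    intro sr d
    simp only [List.foldl_cons, List.countP_cons, pvStep]
    by_cases h0 : pvStatus a = 0
    · rw [if_pos (by simp [h0])]
      obtain ⟨e0, e1, e2⟩ := ih (sr ++ [pvStatus a]) (d.insert "畅通" (d.getD "畅通" 0 + 1))
      rw [e0, e1, e2]
      refine ⟨?_, ?_, ?_⟩ <;> simp [PySem.Dict.getD_insert, h0] <;> omega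
    · rw [if_neg (by simp [h0])]
      by_cases h1 : pvStatus a = 1
      · rw [if_pos (by simp [h1])]
        obtain ⟨e0, e1, e2⟩ := ih (sr ++ [pvStatus a]) (d.insert "缓行" (d.getD "缓行" 0 + 1))
        rw [e0, e1, e2]
        refine ⟨?_, ?_, ?_⟩ <;> simp [PySem.Dict.getD_insert, h1] <;> omega
      · rw [if_neg (by simp [h1])]
        obtain ⟨e0, e1, e2⟩ := ih (sr ++ [pvStatus a]) (d.insert "拥堵" (d.getD "拥堵" 0 + 1))
        rw [e0, e1, e2]
        refine ⟨?_, ?_, ?_⟩ <;> simp [PySem.Dict.getD_insert, h0, h1] <;> omega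

-- characterisation of B's divide and conquer: it computes the two tallies and length minus both
lemma pvTally_eq_aux : ∀ (n : Nat) (annos : List (List (String × Int))), annos.length = n →
    pvTally annos =
      ((annos.countP (fun a => pvStatus a == 0) : Int),
       (annos.countP (fun a => pvStatus a == 1) : Int),
       (annos.length : Int) - (annos.countP (fun a => pvStatus a == 0) : Int)
                            - (annos.countP (fun a => pvStatus a == 1) : Int)) := by
  intro n
  induction n using Nat.strong_induction_on with
  | _ n ih =>
    intro annos hn
    rw [pvTally]
    split_ifs with h0 h1
    · have : annos = [] := List.length_eq_zero_iff.mp h0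
      subst this; simp
    · obtain ⟨a, ha⟩ := List.length_eq_one_iff.mp h1
      subst ha
      by_cases hs0 : pvStatus a = 0
      · simp [PySem.List.pyGet?, PySem.List.pyIdx?, hs0]
      · by_cases hs1 : pvStatus a = 1
        · simp [PySem.List.pyGet?, PySem.List.pyIdx?, hs0, hs1]
        · simp [PySem.List.pyGet?, PySem.List.pyIdx?, hs0, hs1]
    · simp only []
      have hlt : annos.length / 2 < annos.length := by omega
      have hpos : 0 < annos.length / 2 := by omega
      have htl : (annos.take (annos.length / 2)).length = annos.length / 2 := by
        simp [List.length_take]; omega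
      have hdl : (annos.drop (annos.length / 2)).length = annos.length - annos.length / 2 := by
        simp [List.length_drop]
      rw [ih (annos.take (annos.length / 2)).length (by omega) _ rfl,
          ih (annos.drop (annos.length / 2)).length (by omega) _ rfl]
      have hsplit := List.take_append_drop (annos.length / 2) annos
      have c0 : annos.countP (fun a => pvStatus a == 0)
          = (annos.take (annos.length / 2)).countP (fun a => pvStatus a == 0)
          + (annos.drop (annos.length / 2)).countP (fun a => pvStatus a == 0) := by
        conv_lhs => rw [← hsplit]
        rw [List.countP_append]
      have c1 : annos.countP (fun a => pvStatus a == 1)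
          = (annos.take (annos.length / 2)).countP (fun a => pvStatus a == 1)
          + (annos.drop (annos.length / 2)).countP (fun a => pvStatus a == 1) := by
        conv_lhs => rw [← hsplit]
        rw [List.countP_append]
      refine Prod.ext ?_ (Prod.ext ?_ ?_) <;>
        simp [c0, c1, htl, hdl] <;> push_cast <;> omega

lemma pvTally_eq (annos : List (List (String × Int))) :
    pvTally annos =
      ((annos.countP (fun a => pvStatus a == 0) : Int),
       (annos.countP (fun a => pvStatus a == 1) : Int),
       (annos.length : Int) - (annos.countP (fun a => pvStatus a == 0) : Int)
                            - (annos.countP (fun a => pvStatus a == 1) : Int)) :=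
  pvTally_eq_aux annos.length annos rfl

-- ===== VERDICT (by name: the statement is the Claim_ definition above) =====
theorem cnt_results_spec : Claim_equal_cnt_results := by
  intro submit _ _
  unfold Spec_cnt_results cnt_results cnt_results_alt
  cases hget : PySem.Dict.get? (PySem.Dict.mk submit) "annotations" with
  | none => rfl
  | some annos =>
    have h := cnt_loop_invariant annos [] (PySem.Dict.mk [("畅通", 0), ("缓行", 0), ("拥堵", 0)])
    simp only [] at h ⊢
    rw [pvTally_eq, h.1, h.2.1, h.2.2]
    simp [PySem.Dict.getD]
    decide
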